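-- pv_equiv track=rewrite | github.com/nicoleortiz/AdventOfCode | day8.py | getUniques
-- ===== SOURCE A (Python) =====
-- def getUniques(values):
--     total = 0
--     for value in values:
--         value = list(str(value))
--         for v in value:
--             if '1' == v:
--                 total = total + 1
--             if '4' == v:
--                 total = total + 1
--             if '7' == v:
--                 total = total + 1
--             if '8' == v:
--                 total = total + 1
--     return total
-- ===== SOURCE B (Python) =====
-- def getUniques(values):
--     def f(n):
--         c = 1 if n % 10 in (1, 4, 7, 8) else 0
--         return c if n < 10 else c + f(n // 10)
--     return sum(f(abs(v)) for v in values)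
-- ===== Notes on version B (the rewrite author's own statement) =====
-- stated objective: alternative
-- what changed: B never converts numbers to strings: it extracts decimal digits arithmetically (recursive n%10 / n//10 on abs(v)) and sums a per-value count, instead of A's iteration over the characters of str(value) with a four-way branch.
import Mathlib
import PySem

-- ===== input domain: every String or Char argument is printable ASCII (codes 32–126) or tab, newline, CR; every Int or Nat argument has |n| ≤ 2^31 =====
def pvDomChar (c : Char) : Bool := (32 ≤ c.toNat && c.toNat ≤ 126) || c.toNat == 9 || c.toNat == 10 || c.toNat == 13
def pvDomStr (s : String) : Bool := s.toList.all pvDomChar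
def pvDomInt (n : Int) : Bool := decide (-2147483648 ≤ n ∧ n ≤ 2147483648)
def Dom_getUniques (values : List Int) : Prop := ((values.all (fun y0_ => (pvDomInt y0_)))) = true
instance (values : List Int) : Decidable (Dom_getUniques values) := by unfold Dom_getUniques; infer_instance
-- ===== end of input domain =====

-- B replaces A's iteration over the characters of str(value) by recursive arithmetic digit extraction (n % 10 / n // 10 on |v|) summed per value (alternative structure, same cost).


-- ===== PORT A =====
def getUniques (values : List Int) : Int :=
  values.foldl (fun total value =>
    (PySem.Int.toChars value).foldl (fun t v =>
      let t := if '1' = v then t + 1 else t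
      let t := if '4' = v then t + 1 else t
      let t := if '7' = v then t + 1 else t
      if '8' = v then t + 1 else t) total) 0

-- ===== PORT B =====
/-- B's inner recursion f: count of special digits of n by arithmetic extraction. -/
def specCount (n : Nat) : Int :=
  let c : Int := if n % 10 = 1 ∨ n % 10 = 4 ∨ n % 10 = 7 ∨ n % 10 = 8 then 1 else 0
  if n < 10 then c else c + specCount (n / 10)
decreasing_by exact Nat.div_lt_self (by omega) (by omega)

def getUniques_alt (values : List Int) : Int :=
  (values.map (fun v => specCount v.natAbs)).sum

-- ===== PRECONDITION & SPEC =====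
def Spec_getUniques (values : List Int) (out : Int) : Prop := out = getUniques_alt values
instance (values : List Int) (out : Int) : Decidable (Spec_getUniques values out) := by unfold Spec_getUniques; infer_instance

-- ===== CLAIM (what is proved, stated in full; the proofs are below) =====
def Claim_equal_getUniques : Prop := ∀ (values : List Int), Dom_getUniques values → Spec_getUniques values (getUniques values)

-- ===== LEMMAS AND PROOFS =====

/-- Number of special chars ('1','4','7','8') in a char list, as an Int. -/
def cnt (l : List Char) : Int :=
  (l.count '1' : Int) + l.count '4' + l.count '7' + l.count '8'

theorem cnt_nil : cnt [] = 0 := by simp [cnt]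

theorem cnt_cons (c : Char) (l : List Char) : cnt (c :: l) = cnt [c] + cnt l := by
  simp [cnt, List.count_cons]
  ring

/-- The special-digit indicator of a digit value equals cnt of its digit char. -/
theorem cnt_digitChar (m : Nat) (hm : m < 10) :
    cnt [Nat.digitChar m] =
      (if m = 1 ∨ m = 4 ∨ m = 7 ∨ m = 8 then (1 : Int) else 0) := by
  interval_cases m <;> decide

/-- toDigitsCore, with enough fuel, contributes exactly specCount of the number. -/
theorem cnt_toDigitsCore (n : Nat) : ∀ (fuel : Nat) (ds : List Char), n < fuel →
    cnt (Nat.toDigitsCore 10 fuel n ds) = specCount n + cnt ds := by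
  induction n using Nat.strong_induction_on with
  | _ n ih =>
    intro fuel ds hfuel
    match fuel with
    | 0 => omega
    | fuel + 1 =>
      rw [Nat.toDigitsCore]
      by_cases h0 : n / 10 = 0
      · have hn : n < 10 := by omega
        simp only [h0, if_true]
        rw [cnt_cons, specCount]
        have : n % 10 = n := Nat.mod_eq_of_lt hn
        simp [hn, this, cnt_digitChar n hn]
      · simp only [h0, if_false]
        have hlt : n / 10 < n := Nat.div_lt_self (by omega) (by omega)
        rw [ih (n / 10) hlt fuel _ (by omega), cnt_cons]
        conv_rhs => rw [specCount]
        have hn : ¬ n < 10 := by omega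
        rw [if_neg hn, cnt_digitChar (n % 10) (Nat.mod_lt _ (by omega))]
        ring

theorem cnt_toDigits (m : Nat) : cnt (Nat.toDigits 10 m) = specCount m := by
  rw [Nat.toDigits, cnt_toDigitsCore m (m + 1) [] (by omega), cnt_nil, add_zero]

/-- A's per-value char list counts to specCount of the absolute value. -/
theorem cnt_toChars (v : Int) : cnt (PySem.Int.toChars v) = specCount v.natAbs := by
  rw [PySem.Int.toChars]
  by_cases hv : v < 0
  · rw [if_pos hv, cnt_cons]
    have : cnt ['-'] = 0 := by decide
    rw [this, zero_add, cnt_toDigits]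
  · rw [if_neg hv, cnt_toDigits]
    congr 1
    omega

/-- A's inner loop adds the four digit counts of the char list. -/
theorem a_inner (l : List Char) (t0 : Int) :
    l.foldl (fun t v =>
      let t := if '1' = v then t + 1 else t
      let t := if '4' = v then t + 1 else t
      let t := if '7' = v then t + 1 else t
      if '8' = v then t + 1 else t) t0 = t0 + cnt l := by
  induction l generalizing t0 with
  | nil => simp [cnt_nil]
  | cons c cs ih =>
    rw [List.foldl_cons, ih, cnt_cons]
    by_cases h1 : c = '1' <;> by_cases h4 : c = '4' <;> by_cases h7 : c = '7' <;>
      by_cases h8 : c = '8' <;>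
      simp [h1, h4, h7, h8, eq_comm, cnt] <;> ring

/-- A's outer loop is t0 plus the sum of per-value specCounts. -/
theorem a_outer (values : List Int) (t0 : Int) :
    values.foldl (fun total value =>
      (PySem.Int.toChars value).foldl (fun t v =>
        let t := if '1' = v then t + 1 else t
        let t := if '4' = v then t + 1 else t
        let t := if '7' = v then t + 1 else t
        if '8' = v then t + 1 else t) total) t0
    = t0 + (values.map (fun v => specCount v.natAbs)).sum := by
  induction values generalizing t0 with
  | nil => simp
  | cons v vs ih =>
    rw [List.foldl_cons, a_inner, cnt_toChars, ih]
    simp only [List.map_cons, List.sum_cons]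
    ring

-- ===== VERDICT (by name: the statement is the Claim_ definition above) =====
theorem getUniques_spec : Claim_equal_getUniques := by
  intro values _
  unfold Spec_getUniques getUniques getUniques_alt
  rw [a_outer, zero_add]
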